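-- pv_equiv track=rewrite | github.com/WikiAr/wd-core | dump/do_text.py | make_numbers_section
-- ===== SOURCE A (Python) =====
-- def make_numbers_section(p31list):
--     xline = ""
--     yline = ""
--     # ---
--     rows = []
--     # ---
--     property_other = 0
--     # ---
--     n = 0
--     # ---
--     for Len, P in p31list:
--         n += 1
--         if n < 27:
--             xline += f",{P}"
--             yline += f",{Len}"
--         # ---
--         if len(rows) < 101:
--             Len = f"{Len:,}"
--             P = "{{P|%s}}" % P
--             lune = f"| {n} || {P} || {Len} "
--             rows.append(lune)
--         else:
--             property_other += int(Len)
--     # ---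
--     Chart2 = "{| class='floatright sortable' \n|-\n|"
--     Chart2 += "{{Graph:Chart|width=900|height=100|xAxisTitle=property|yAxisTitle=usage|type=rect\n"
--     Chart2 += f"|x={xline}\n|y1={yline}"
--     Chart2 += "\n}}"
--     Chart2 += "\n|-\n|}"
--     # ---
--     Chart2 = Chart2.replace("=,", "=")
--     # ---
--     rows.append(f"! {n} \n| others \n| {property_other:,}")
--     rows = "\n|-\n".join(rows)
--     table = (
--         "\n{| "
--         + f'class="wikitable sortable"\n|-\n! #\n! property\n! usage\n|-\n{rows}\n'
--         + "|}"
--     )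
--     # ---
--     text = "== Numbers ==\n" f"\n{Chart2}\n{table}"
--     # ---
--     return text
-- ===== SOURCE B (Python) =====
-- def make_numbers_section(p31list):
--     head = p31list[:26]
--     xline = "".join(",%s" % P for _, P in head)
--     yline = "".join(",%s" % Len for Len, _ in head)
--     rows = [
--         "| {} || {{{{P|{}}}}} || {:,} ".format(i, P, Len)
--         for i, (Len, P) in enumerate(p31list[:101], 1)
--     ]
--     property_other = sum(Len for Len, _ in p31list[101:])
--     n = len(p31list)
--     chart = (
--         "{| class='floatright sortable' \n|-\n|"
--         "{{Graph:Chart|width=900|height=100|xAxisTitle=property|yAxisTitle=usage|type=rect\n"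
--         "|x=%s\n|y1=%s"
--         "\n}}"
--         "\n|-\n|}" % (xline, yline)
--     ).replace("=,", "=")
--     rows.append("! {} \n| others \n| {:,}".format(n, property_other))
--     body = "\n|-\n".join(rows)
--     return (
--         "== Numbers ==\n"
--         "\n%s\n"
--         '\n{| class="wikitable sortable"\n|-\n! #\n! property\n! usage\n|-\n%s\n|}'
--         % (chart, body)
--     )
-- ===== Notes on version B (the rewrite author's own statement) =====
-- stated objective: simpler
-- what changed: A's single loop threading five accumulators (xline, yline, rows, property_other, n) is replaced by three independent passes over slices: chart columns joined from p31list[:26], table rows from enumerate(p31list[:101], 1), and the others-sum over p31list[101:], with n = len(p31list).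
import Mathlib
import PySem

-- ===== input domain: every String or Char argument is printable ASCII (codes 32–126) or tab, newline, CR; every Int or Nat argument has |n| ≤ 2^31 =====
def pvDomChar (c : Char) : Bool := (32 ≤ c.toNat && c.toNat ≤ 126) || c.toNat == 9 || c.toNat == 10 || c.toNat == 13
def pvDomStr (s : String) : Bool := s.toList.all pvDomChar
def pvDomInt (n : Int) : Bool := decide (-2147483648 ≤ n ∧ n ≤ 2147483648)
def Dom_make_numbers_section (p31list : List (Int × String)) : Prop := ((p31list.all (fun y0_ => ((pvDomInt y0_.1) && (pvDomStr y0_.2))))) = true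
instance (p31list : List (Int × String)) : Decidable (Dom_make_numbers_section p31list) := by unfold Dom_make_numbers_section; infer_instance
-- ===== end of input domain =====

-- B replaces A's single five-accumulator counter loop by three independent passes over
-- slices (chart columns from p31list[:26], table rows from enumerate(p31list[:101], 1),
-- the "others" sum from p31list[101:]); objective: simpler. Return value is identical.

-- ===== PORT A =====

-- shared helper: exact model of Python's format f"{v:,}" for an int v
-- (digits of |v| grouped in threes from the right with ',', '-' in front if negative).
-- group3 takes the REVERSED digit list and inserts ',' after every 3 chars.
def group3 (ds : List Char) : List Char :=
  if _h : ds.length ≤ 3 then ds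
  else ds.take 3 ++ ',' :: group3 (ds.drop 3)
termination_by ds.length
decreasing_by simp; omega

def fmtComma (v : Int) : List Char :=
  (if v < 0 then ['-'] else []) ++ (group3 (PySem.Int.toChars (v.natAbs : Int)).reverse).reverse

-- one step of A's for-loop; state = (xline, yline, rows, property_other, n)
def mnsStep (st : List Char × List Char × List (List Char) × Int × Int)
    (lp : Int × String) : List Char × List Char × List (List Char) × Int × Int :=
  let (xline, yline, rows, property_other, n) := st
  let (len0, p0) := lp
  let n := n + 1
  let (xline, yline) :=
    if n < 27 then (xline ++ ',' :: p0.toList, yline ++ ',' :: PySem.Int.toChars len0)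
    else (xline, yline)
  if rows.length < 101 then
    let lenS := fmtComma len0
    let pS := "{{P|".toList ++ p0.toList ++ "}}".toList
    let lune := "| ".toList ++ PySem.Int.toChars n ++ " || ".toList ++ pS
                 ++ " || ".toList ++ lenS ++ [' ']
    (xline, yline, rows ++ [lune], property_other, n)
  else
    (xline, yline, rows, property_other + len0, n)

def make_numbers_section (p31list : List (Int × String)) : String :=
  let st := p31list.foldl mnsStep ([], [], [], 0, 0)
  let xline := st.1
  let yline := st.2.1
  let rows := st.2.2.1
  let property_other := st.2.2.2.1
  let n := st.2.2.2.2
  let chart2 := "{| class='floatright sortable' \n|-\n|".toList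
  let chart2 := chart2 ++ "{{Graph:Chart|width=900|height=100|xAxisTitle=property|yAxisTitle=usage|type=rect\n".toList
  let chart2 := chart2 ++ "|x=".toList ++ xline ++ "\n|y1=".toList ++ yline
  let chart2 := chart2 ++ "\n}}".toList
  let chart2 := chart2 ++ "\n|-\n|}".toList
  let chart2 := PySem.Chars.replace chart2 "=,".toList "=".toList
  let rows := rows ++ ["! ".toList ++ PySem.Int.toChars n ++ " \n| others \n| ".toList
                        ++ fmtComma property_other]
  let rowsS := PySem.Chars.join "\n|-\n".toList rows
  let table := "\n{| ".toList
      ++ "class=\"wikitable sortable\"\n|-\n! #\n! property\n! usage\n|-\n".toList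
      ++ rowsS ++ ['\n'] ++ "|}".toList
  String.ofList ("== Numbers ==\n".toList ++ ['\n'] ++ chart2 ++ ['\n'] ++ table)

-- ===== PORT B =====

-- one table row: "| {i} || {{P|{p}}} || {len:,} "
def luneAlt (i : Int) (len0 : Int) (p0 : String) : List Char :=
  "| ".toList ++ PySem.Int.toChars i ++ " || {{P|".toList ++ p0.toList
    ++ "}} || ".toList ++ fmtComma len0 ++ [' ']

def make_numbers_section_alt (p31list : List (Int × String)) : String :=
  let head := PySem.List.slice p31list none (some 26)
  let xline := PySem.Chars.join [] (head.map fun lp => ',' :: lp.2.toList)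
  let yline := PySem.Chars.join [] (head.map fun lp => ',' :: PySem.Int.toChars lp.1)
  let rows := (PySem.List.enumerate (PySem.List.slice p31list none (some 101)) 1).map
      fun ip => luneAlt ip.1 ip.2.1 ip.2.2
  let property_other := ((PySem.List.slice p31list (some 101) none).map (·.1)).sum
  let n : Int := p31list.length
  let chart := PySem.Chars.replace
      ("{| class='floatright sortable' \n|-\n|{{Graph:Chart|width=900|height=100|xAxisTitle=property|yAxisTitle=usage|type=rect\n|x=".toList
        ++ xline ++ "\n|y1=".toList ++ yline ++ "\n}}\n|-\n|}".toList)
      "=,".toList "=".toList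
  let rows := rows ++ ["! ".toList ++ PySem.Int.toChars n ++ " \n| others \n| ".toList
                        ++ fmtComma property_other]
  let body := PySem.Chars.join "\n|-\n".toList rows
  String.ofList ("== Numbers ==\n\n".toList ++ chart
      ++ "\n\n{| class=\"wikitable sortable\"\n|-\n! #\n! property\n! usage\n|-\n".toList
      ++ body ++ "\n|}".toList)

-- ===== PRECONDITION & SPEC =====
def Spec_make_numbers_section (p31list : List (Int × String)) (out : String) : Prop := out = make_numbers_section_alt p31list
instance (p31list : List (Int × String)) (out : String) : Decidable (Spec_make_numbers_section p31list out) := by unfold Spec_make_numbers_section; infer_instance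

-- ===== CLAIM (what is proved, stated in full; the proofs are below) =====
def Claim_equal_make_numbers_section : Prop := ∀ (p31list : List (Int × String)), Dom_make_numbers_section p31list → Spec_make_numbers_section p31list (make_numbers_section p31list)

-- ===== LEMMAS AND PROOFS =====

theorem join_nil_cons (a : List Char) (l : List (List Char)) :
    PySem.Chars.join [] (a :: l) = a ++ PySem.Chars.join [] l := by
  induction l with
  | nil => simp [PySem.Chars.join, List.intercalate]
  | cons b t ih =>
      simp [PySem.Chars.join, List.intercalate, List.intersperse] at ih ⊢

-- the loop invariant: folding A's step over l from a state reached after n items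
theorem loopA (l : List (Int × String)) (x y : List Char) (r : List (List Char))
    (o : Int) (n : Nat) (hr : r.length = min n 101) :
    l.foldl mnsStep (x, y, r, o, (n : Int)) =
      (x ++ PySem.Chars.join [] ((l.take (26 - n)).map fun lp => ',' :: lp.2.toList),
       y ++ PySem.Chars.join [] ((l.take (26 - n)).map fun lp => ',' :: PySem.Int.toChars lp.1),
       r ++ (PySem.List.enumerate (l.take (101 - n)) ((n : Int) + 1)).map
              (fun ip => luneAlt ip.1 ip.2.1 ip.2.2),
       o + ((l.drop (101 - n)).map (·.1)).sum,
       (n : Int) + l.length) := by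
  induction l generalizing x y r o n with
  | nil => simp [PySem.Chars.join_nil]
  | cons hd t ih =>
      obtain ⟨len0, p0⟩ := hd
      by_cases h26 : n < 26
      · have e1 : 26 - n = (26 - (n + 1)) + 1 := by omega
        have e2 : 101 - n = (101 - (n + 1)) + 1 := by omega
        have step : mnsStep (x, y, r, o, (n : Int)) (len0, p0)
            = (x ++ ',' :: p0.toList, y ++ ',' :: PySem.Int.toChars len0,
               r ++ ["| ".toList ++ PySem.Int.toChars ((n : Int) + 1) ++ " || ".toList
                 ++ ("{{P|".toList ++ p0.toList ++ "}}".toList)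
                 ++ " || ".toList ++ fmtComma len0 ++ [' ']], o, (n : Int) + 1) := by
          simp only [mnsStep]
          rw [if_pos (by omega : (n : Int) + 1 < 27), if_pos (by omega : r.length < 101)]
        have hcast : (n : Int) + 1 = ((n + 1 : Nat) : Int) := by push_cast; ring
        rw [List.foldl_cons, step, hcast,
            ih _ _ _ _ (n + 1) (by simp [hr]; omega)]
        rw [e1, e2]
        simp [List.take_succ_cons, List.drop_succ_cons, join_nil_cons,
              PySem.List.enumerate_cons, luneAlt]
        omega
      · by_cases h101 : n < 101
        · have e2 : 101 - n = (101 - (n + 1)) + 1 := by omega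
          have e1 : 26 - n = 0 := by omega
          have step : mnsStep (x, y, r, o, (n : Int)) (len0, p0)
              = (x, y,
                 r ++ ["| ".toList ++ PySem.Int.toChars ((n : Int) + 1) ++ " || ".toList
                   ++ ("{{P|".toList ++ p0.toList ++ "}}".toList)
                   ++ " || ".toList ++ fmtComma len0 ++ [' ']], o, (n : Int) + 1) := by
            simp only [mnsStep]
            rw [if_neg (by omega : ¬ ((n : Int) + 1 < 27)), if_pos (by omega : r.length < 101)]
          have hcast : (n : Int) + 1 = ((n + 1 : Nat) : Int) := by push_cast; ring
          rw [List.foldl_cons, step, hcast,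
              ih _ _ _ _ (n + 1) (by simp [hr]; omega)]
          rw [e1, e2]
          have e1' : 26 - (n + 1) = 0 := by omega
          rw [e1']
          simp [List.take_succ_cons, PySem.Chars.join_nil,
                PySem.List.enumerate_cons, luneAlt]
          omega
        · have e1 : 26 - n = 0 := by omega
          have e2 : 101 - n = 0 := by omega
          have step : mnsStep (x, y, r, o, (n : Int)) (len0, p0)
              = (x, y, r, o + len0, (n : Int) + 1) := by
            simp only [mnsStep]
            rw [if_neg (by omega : ¬ ((n : Int) + 1 < 27)), if_neg (by omega : ¬ (r.length < 101))]
          have hcast : (n : Int) + 1 = ((n + 1 : Nat) : Int) := by push_cast; ring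
          rw [List.foldl_cons, step, hcast,
              ih _ _ _ _ (n + 1) (by omega)]
          have e1' : 26 - (n + 1) = 0 := by omega
          have e2' : 101 - (n + 1) = 0 := by omega
          rw [e1, e2, e1', e2']
          simp
          omega

-- ===== VERDICT (by name: the statement is the Claim_ definition above) =====
theorem make_numbers_section_spec : Claim_equal_make_numbers_section := by
  intro p31list _
  unfold Spec_make_numbers_section make_numbers_section make_numbers_section_alt
  have hl := loopA p31list [] [] [] 0 0 (by simp)
  norm_num at hl
  rw [hl]
  rw [PySem.List.slice_to p31list (by norm_num : (0:Int) ≤ 26),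
      PySem.List.slice_to p31list (by norm_num : (0:Int) ≤ 101),
      PySem.List.slice_from p31list (by norm_num : (0:Int) ≤ 101)]
  simp [List.append_assoc]
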